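-- pv_equiv track=rewrite | github.com/steveobbayi/camera-calibration-pvr | camera-calibration-pvr.py | poly_sub
-- ===== SOURCE A (Python) =====
-- def poly_sub(a, b):
--     """Subtract the two polynomials"""
--     n = max(len(a), len(b))
--     _a = [0] * n
--     _b = [0] * n
--     for i in range(len(a)):
--         _a[i] = a[i]
--     for i in range(len(b)):
--         _b[i] = b[i]
--     result = []
--     for i in range(n):
--         result.append(_a[i] - _b[i])
--     return result
-- ===== SOURCE B (Python) =====
-- def poly_sub(a, b):
--     """Subtract the two polynomials"""
--     m = min(len(a), len(b))
--     result = [a[i] - b[i] for i in range(m)]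
--     if len(a) > len(b):
--         result.extend(a[m:])
--     elif len(b) > len(a):
--         result.extend(-x for x in b[m:])
--     return result
-- ===== Notes on version B (the rewrite author's own statement) =====
-- stated objective: simpler
-- what changed: Drops the two zero-padded copies: computes the min-length overlap directly, then appends the leftover tail of a unchanged or the negated tail of b.
import Mathlib
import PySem

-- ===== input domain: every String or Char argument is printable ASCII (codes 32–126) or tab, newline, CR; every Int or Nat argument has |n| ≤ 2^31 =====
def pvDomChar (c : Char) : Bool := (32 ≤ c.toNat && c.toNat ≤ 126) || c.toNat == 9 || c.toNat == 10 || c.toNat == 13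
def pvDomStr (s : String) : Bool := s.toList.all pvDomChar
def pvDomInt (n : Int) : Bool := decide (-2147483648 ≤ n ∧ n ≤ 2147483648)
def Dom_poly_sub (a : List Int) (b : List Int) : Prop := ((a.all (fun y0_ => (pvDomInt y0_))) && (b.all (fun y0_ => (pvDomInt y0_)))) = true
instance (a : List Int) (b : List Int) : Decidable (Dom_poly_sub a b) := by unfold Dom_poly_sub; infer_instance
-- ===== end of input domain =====

-- B simplifies A: no zero-padded copies; it subtracts over the min-length overlap and appends
-- the leftover tail of a unchanged (or the negated tail of b). Same O(n) cost, simpler code.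

-- ===== PORT A =====
-- literal transliteration of A: pad both inputs with zeros to the max length
-- (the two copy loops become foldl/set over range; indices are always in range,
-- so List.getD i 0 is exact for Python's a[i] here), then subtract pointwise
-- by appending to an accumulator.
def poly_sub (a : List Int) (b : List Int) : List Int :=
  let n := max a.length b.length
  let pa := (List.range a.length).foldl (fun l i => l.set i (a.getD i 0)) (List.replicate n 0)
  let pb := (List.range b.length).foldl (fun l i => l.set i (b.getD i 0)) (List.replicate n 0)
  (List.range n).foldl (fun r i => r ++ [pa.getD i 0 - pb.getD i 0]) []

-- ===== PORT B =====
-- transliteration of Source B: overlap comprehension, then extend with the proper tail.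
def poly_sub_alt (a : List Int) (b : List Int) : List Int :=
  let m := min a.length b.length
  let result := (List.range m).map (fun i => a.getD i 0 - b.getD i 0)
  if a.length > b.length then result ++ a.drop m
  else if b.length > a.length then result ++ (b.drop m).map (fun x => -x)
  else result

-- ===== PRECONDITION & SPEC =====
def Spec_poly_sub (a : List Int) (b : List Int) (out : List Int) : Prop := out = poly_sub_alt a b
instance (a : List Int) (b : List Int) (out : List Int) : Decidable (Spec_poly_sub a b out) := by unfold Spec_poly_sub; infer_instance

-- ===== CLAIM (what is proved, stated in full; the proofs are below) =====
def Claim_equal_poly_sub : Prop := ∀ (a : List Int) (b : List Int), Dom_poly_sub a b → Spec_poly_sub a b (poly_sub a b)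

-- ===== LEMMAS AND PROOFS =====

/-- Reference recursion both ports are reduced to. -/
def pvSub2 : List Int → List Int → List Int
  | [], b => b.map (fun x => -x)
  | x :: a, [] => x :: a
  | x :: a, y :: b => (x - y) :: pvSub2 a b

/-- The copy loop writes `a.take m` over the front of `l`. -/
theorem pv_fold_set (a : List Int) :
    ∀ (m : ℕ) (l : List Int), m ≤ a.length → m ≤ l.length →
      (List.range m).foldl (fun acc i => acc.set i (a.getD i 0)) l = a.take m ++ l.drop m := by
  intro m
  induction m with
  | zero => intro l _ _; simp
  | succ k ih =>
    intro l hk hl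
    rw [List.range_succ, List.foldl_append, ih l (by omega) (by omega)]
    simp only [List.foldl_cons, List.foldl_nil]
    have hlen : (a.take k).length = k := by simp; omega
    rw [show (a.take k ++ l.drop k).set k (a.getD k 0)
        = a.take k ++ (l.drop k).set 0 (a.getD k 0) by
      rw [List.set_append]; simp [hlen]]
    rw [List.drop_eq_getElem_cons (by omega : k < l.length)]
    simp only [List.set_cons_zero]
    rw [show a.take (k + 1) = a.take k ++ [a.getD k 0] by
      rw [List.take_add_one]
      congr 1
      rw [List.getD_eq_getElem?_getD, List.getElem?_eq_getElem (by omega)]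
      simp]
    simp

/-- Padded list reads like the original under `getD _ 0`. -/
theorem pv_getD_pad (a : List Int) (k i : ℕ) :
    (a ++ List.replicate k 0).getD i 0 = a.getD i 0 := by
  by_cases h : i < a.length
  · rw [List.getD_append _ _ _ _ h]
  · have hnone : a[i]? = none := List.getElem?_eq_none (by omega)
    rw [List.getD_eq_getElem?_getD, List.getD_eq_getElem?_getD,
        List.getElem?_append_right (by omega), hnone]
    simp only [List.getElem?_replicate, Option.getD_none]
    split <;> rfl

/-- The append loop is a map. -/
theorem pv_fold_append (f : ℕ → Int) :
    ∀ (n : ℕ) (acc : List Int),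
      (List.range n).foldl (fun r i => r ++ [f i]) acc = acc ++ (List.range n).map f := by
  intro n
  induction n with
  | zero => simp
  | succ k ih =>
    intro acc
    rw [List.range_succ, List.foldl_append, ih]
    simp

/-- Port A in closed map form. -/
theorem pv_polysub_map (a b : List Int) :
    poly_sub a b =
      (List.range (max a.length b.length)).map (fun i => a.getD i 0 - b.getD i 0) := by
  have ha := pv_fold_set a a.length (List.replicate (max a.length b.length) 0)
    (le_refl _) (by simp)
  have hb := pv_fold_set b b.length (List.replicate (max a.length b.length) 0)
    (le_refl _) (by simp)
  simp only [List.take_length, List.drop_replicate] at ha hb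
  simp only [poly_sub]
  rw [ha, hb, pv_fold_append]
  simp only [List.nil_append]
  apply List.map_congr_left
  intro i _
  rw [pv_getD_pad, pv_getD_pad]

theorem pv_map_getD (a : List Int) :
    (List.range a.length).map (fun i => a.getD i 0) = a := by
  induction a with
  | nil => simp
  | cons x t ih =>
    simp only [List.length_cons, List.range_succ_eq_map, List.map_cons, List.map_map]
    simp only [List.getD_cons_zero]
    have htail : (List.range t.length).map ((fun i => (x :: t).getD i 0) ∘ Nat.succ)
        = (List.range t.length).map (fun i => t.getD i 0) := by
      apply List.map_congr_left; intro i _; simp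
    rw [htail, ih]

/-- A's map form equals the reference recursion. -/
theorem pv_map_eq_sub2 (a : List Int) : ∀ b : List Int,
    (List.range (max a.length b.length)).map (fun i => a.getD i 0 - b.getD i 0) = pvSub2 a b := by
  induction a with
  | nil =>
    intro b
    induction b with
    | nil => simp [pvSub2]
    | cons y t ihb =>
      simp only [List.length_nil, List.length_cons, Nat.max_eq_right (Nat.zero_le _),
        List.range_succ_eq_map, List.map_cons, List.map_map, pvSub2]
      have htail : (List.range t.length).map ((fun i => ([] : List Int).getD i 0 - (y :: t).getD i 0) ∘ Nat.succ)
          = (List.range t.length).map (fun i => ([] : List Int).getD i 0 - t.getD i 0) := by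
        apply List.map_congr_left; intro i _; simp
      rw [htail]
      have hihb : (List.range t.length).map (fun i => ([] : List Int).getD i 0 - t.getD i 0)
          = t.map (fun x => -x) := by
        simpa [Nat.max_eq_right (Nat.zero_le _), pvSub2] using ihb
      rw [hihb]
      simp
  | cons x ta ih =>
    intro b
    cases b with
    | nil =>
      simp only [List.length_nil, Nat.max_eq_left (Nat.zero_le _), pvSub2]
      calc (List.range (x :: ta).length).map (fun i => (x :: ta).getD i 0 - ([] : List Int).getD i 0)
          = (List.range (x :: ta).length).map (fun i => (x :: ta).getD i 0) := by
            apply List.map_congr_left; intro i _; simp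
        _ = x :: ta := pv_map_getD _
    | cons y tb =>
      simp only [List.length_cons, Nat.succ_max_succ, List.range_succ_eq_map,
        List.map_cons, List.map_map, pvSub2]
      have htail : (List.range (max ta.length tb.length)).map
            ((fun i => (x :: ta).getD i 0 - (y :: tb).getD i 0) ∘ Nat.succ)
          = (List.range (max ta.length tb.length)).map (fun i => ta.getD i 0 - tb.getD i 0) := by
        apply List.map_congr_left; intro i _; simp
      rw [htail, ih tb]
      simp

/-- B unrolls one step on cons/cons. -/
theorem pv_alt_cons (x y : Int) (a b : List Int) :
    poly_sub_alt (x :: a) (y :: b) = (x - y) :: poly_sub_alt a b := by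
  unfold poly_sub_alt
  simp only [List.length_cons, Nat.succ_min_succ, List.range_succ_eq_map,
    List.map_cons, List.map_map, List.drop_succ_cons, gt_iff_lt, Nat.add_lt_add_iff_right]
  have hmap : (List.range (min a.length b.length)).map
      ((fun i => (x :: a).getD i 0 - (y :: b).getD i 0) ∘ Nat.succ)
      = (List.range (min a.length b.length)).map (fun i => a.getD i 0 - b.getD i 0) := by
    apply List.map_congr_left; intro i _; simp
  rw [hmap]
  simp only [List.getD_cons_zero]
  split_ifs <;> simp

/-- B equals the reference recursion. -/
theorem pv_alt_eq_sub2 (a : List Int) : ∀ b : List Int, poly_sub_alt a b = pvSub2 a b := by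
  induction a with
  | nil =>
    intro b
    cases b with
    | nil => simp [poly_sub_alt, pvSub2]
    | cons y t => simp [poly_sub_alt, pvSub2]
  | cons x ta ih =>
    intro b
    cases b with
    | nil => simp [poly_sub_alt, pvSub2]
    | cons y tb => rw [pv_alt_cons, pvSub2, ih tb]

-- ===== VERDICT (by name: the statement is the Claim_ definition above) =====
theorem poly_sub_spec : Claim_equal_poly_sub := by
  intro a b _
  unfold Spec_poly_sub
  rw [pv_polysub_map, pv_map_eq_sub2, pv_alt_eq_sub2]
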